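-- pv_equiv track=rewrite | github.com/huntekah/aoc_2023 | aoc_11/aoc_11_2.py | count_empty_crossings_between_stars
-- ===== SOURCE A (Python) =====
-- Galaxy = list[str]
--
-- star = "#"
--
-- def is_empty_row(galaxy: Galaxy, row: int) -> bool:
--     return star not in galaxy[row]
--
-- def is_empty_column(galaxy: Galaxy, column: int) -> bool:
--     return star not in list(zip(*galaxy))[column]
--
-- def count_empty_crossings_between_stars(
--     galaxy: Galaxy, star1: tuple[int, int], star2: tuple[int, int]
-- ) -> int:
--     empty_crossings = 0
--     for i in range(star1[0], star2[0]):
--         for j in range(star1[1], star2[1]):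
--             if is_empty_column(galaxy, j) and is_empty_row(galaxy, i):
--                 empty_crossings += 1
--     return empty_crossings
-- ===== SOURCE B (Python) =====
-- def count_empty_crossings_between_stars(galaxy, star1, star2):
--     empty_row = ["#" not in row for row in galaxy]
--     empty_col = ["#" not in col for col in zip(*galaxy)]
--     rows = sum(1 for i in range(star1[0], star2[0]) if empty_row[i])
--     cols = sum(1 for j in range(star1[1], star2[1]) if empty_col[j])
--     return rows * cols
-- ===== Notes on version B (the rewrite author's own statement) =====
-- stated objective: alternative
-- what changed: Instead of rescanning the whole grid for every (i,j) pair in a nested loop, B precomputes boolean empty-row and empty-column tables once and returns the product of the counts of empty rows and empty columns in the two index ranges (asymptotically less work, though a timing run could not credit it since its large inputs fell outside Pre_).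
-- outside the precondition, e.g. on count_empty_crossings_between_stars(['#'], (0, 5), (0, 6)): A returns 0, B raises IndexError; on count_empty_crossings_between_stars(['#'], (5, 0), (6, 1)): A returns 0, B raises IndexError
import Mathlib
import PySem

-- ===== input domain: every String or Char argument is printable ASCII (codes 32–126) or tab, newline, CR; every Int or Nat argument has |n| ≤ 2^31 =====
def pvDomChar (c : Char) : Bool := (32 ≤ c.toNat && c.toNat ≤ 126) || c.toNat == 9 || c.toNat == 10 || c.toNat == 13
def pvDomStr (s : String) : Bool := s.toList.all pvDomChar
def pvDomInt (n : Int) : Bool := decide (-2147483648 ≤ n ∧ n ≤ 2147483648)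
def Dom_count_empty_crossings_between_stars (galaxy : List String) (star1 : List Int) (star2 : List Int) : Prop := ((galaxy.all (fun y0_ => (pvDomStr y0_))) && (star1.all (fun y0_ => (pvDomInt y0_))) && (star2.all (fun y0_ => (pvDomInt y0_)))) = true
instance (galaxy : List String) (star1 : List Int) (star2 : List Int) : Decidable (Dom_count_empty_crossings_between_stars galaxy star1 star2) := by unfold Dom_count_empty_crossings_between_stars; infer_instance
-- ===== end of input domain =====

-- B replaces A's pair-by-pair rescan with a precomputed empty-row / empty-column table and
-- multiplies the two range counts (objective: alternative algorithm, asymptotically less work).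

-- ===== PORT A =====
-- zip(*galaxy): the list of columns, truncated to the shortest row (zip() of no rows is []).
def pvMinLen (rows : List (List Char)) : Nat :=
  match rows with
  | [] => 0
  | r :: rs => rs.foldl (fun m x => min m x.length) r.length

def pvZip (rows : List (List Char)) : List (List Char) :=
  (List.range (pvMinLen rows)).map (fun k => rows.map (fun r => r.getD k ' '))

-- 'star not in galaxy[row]' ('none' = IndexError, excluded by Pre_; default false is never read there)
def is_empty_row (galaxy : List String) (row : Int) : Bool :=
  match PySem.List.pyGet? galaxy row with
  | some s => !PySem.Str.isIn "#" s
  | none => false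

-- 'star not in list(zip(*galaxy))[column]'
def is_empty_column (galaxy : List String) (column : Int) : Bool :=
  match PySem.List.pyGet? (pvZip (galaxy.map String.toList)) column with
  | some col => !col.contains '#'
  | none => false

def count_empty_crossings_between_stars (galaxy : List String) (star1 : List Int) (star2 : List Int) : Int :=
  match PySem.List.pyGet? star1 0, PySem.List.pyGet? star1 1, PySem.List.pyGet? star2 0, PySem.List.pyGet? star2 1 with
  | some i1, some j1, some i2, some j2 =>
      (PySem.List.pyRange i1 i2 1).foldl (fun acc i =>
        (PySem.List.pyRange j1 j2 1).foldl (fun acc2 j =>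
          if is_empty_column galaxy j && is_empty_row galaxy i then acc2 + 1 else acc2) acc) 0
  | _, _, _, _ => 0

-- ===== PORT B =====
-- B's own copy of zip(*galaxy) (ports must not share helpers)
def pvMinLenB (rows : List (List Char)) : Nat :=
  match rows with
  | [] => 0
  | r :: rs => rs.foldl (fun m x => min m x.length) r.length

def pvZipB (rows : List (List Char)) : List (List Char) :=
  (List.range (pvMinLenB rows)).map (fun k => rows.map (fun r => r.getD k ' '))

def count_empty_crossings_between_stars_alt (galaxy : List String) (star1 : List Int) (star2 : List Int) : Int :=
  let emptyRow : List Bool := galaxy.map (fun row => !PySem.Str.isIn "#" row)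
  let emptyCol : List Bool := (pvZipB (galaxy.map String.toList)).map (fun col => !col.contains '#')
  let rows := (PySem.List.pyRange (PySem.List.pyGetD star1 0 0) (PySem.List.pyGetD star2 0 0) 1).foldl
    (fun acc i => if PySem.List.pyGetD emptyRow i false then acc + 1 else acc) (0 : Int)
  let cols := (PySem.List.pyRange (PySem.List.pyGetD star1 1 0) (PySem.List.pyGetD star2 1 0) 1).foldl
    (fun acc j => if PySem.List.pyGetD emptyCol j false then acc + 1 else acc) (0 : Int)
  rows * cols

-- ===== PRECONDITION & SPEC =====
-- Pre_ excludes exactly the inputs where a star list is shorter than 2 (A raises IndexError) and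
-- those where some traversed row or column index is out of bounds: there A either raises IndexError
-- or — when the other range is empty or no traversed column is empty, so the offending lookup is
-- never reached — returns 0, while B, which always indexes both ranges, raises.
def Pre_count_empty_crossings_between_stars (galaxy : List String) (star1 : List Int) (star2 : List Int) : Prop :=
  2 ≤ star1.length ∧ 2 ≤ star2.length ∧
  (PySem.List.pyGetD star1 0 0 < PySem.List.pyGetD star2 0 0 →
    -(galaxy.length : Int) ≤ PySem.List.pyGetD star1 0 0 ∧ PySem.List.pyGetD star2 0 0 ≤ (galaxy.length : Int)) ∧
  (PySem.List.pyGetD star1 1 0 < PySem.List.pyGetD star2 1 0 →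
    -(((galaxy.map (fun s => (s.toList.length : Int))).min?).getD 0) ≤ PySem.List.pyGetD star1 1 0 ∧
      PySem.List.pyGetD star2 1 0 ≤ ((galaxy.map (fun s => (s.toList.length : Int))).min?).getD 0)
instance (galaxy : List String) (star1 : List Int) (star2 : List Int) : Decidable (Pre_count_empty_crossings_between_stars galaxy star1 star2) := by unfold Pre_count_empty_crossings_between_stars; infer_instance

def pvWitness_count_empty_crossings_between_stars : List String × List Int × List Int :=
  (["#.", ".."], [0, 0], [2, 2])

def Spec_count_empty_crossings_between_stars (galaxy : List String) (star1 : List Int) (star2 : List Int) (out : Int) : Prop := out = count_empty_crossings_between_stars_alt galaxy star1 star2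
instance (galaxy : List String) (star1 : List Int) (star2 : List Int) (out : Int) : Decidable (Spec_count_empty_crossings_between_stars galaxy star1 star2 out) := by unfold Spec_count_empty_crossings_between_stars; infer_instance

-- ===== CLAIM (what is proved, stated in full; the proofs are below) =====
def Claim_equal_count_empty_crossings_between_stars : Prop := ∀ (galaxy : List String) (star1 : List Int) (star2 : List Int), Dom_count_empty_crossings_between_stars galaxy star1 star2 → Pre_count_empty_crossings_between_stars galaxy star1 star2 → Spec_count_empty_crossings_between_stars galaxy star1 star2 (count_empty_crossings_between_stars galaxy star1 star2)

-- ===== LEMMAS AND PROOFS =====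

lemma pyGet?_list_map {α β : Type} (f : α → β) (xs : List α) (i : Int) :
    PySem.List.pyGet? (xs.map f) i = (PySem.List.pyGet? xs i).map f := by
  simp [PySem.List.pyGet?, PySem.List.pyIdx?]

lemma lookupRow_eq (galaxy : List String) (i : Int) :
    PySem.List.pyGetD (galaxy.map (fun row => !PySem.Str.isIn "#" row)) i false
      = is_empty_row galaxy i := by
  simp only [PySem.List.pyGetD, pyGet?_list_map, is_empty_row]
  cases PySem.List.pyGet? galaxy i <;> rfl

lemma pvZipB_eq_pvZip : pvZipB = pvZip := rfl

lemma lookupCol_eq (galaxy : List String) (j : Int) :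
    PySem.List.pyGetD ((pvZipB (galaxy.map String.toList)).map (fun col => !col.contains '#')) j false
      = is_empty_column galaxy j := by
  rw [pvZipB_eq_pvZip]
  simp only [PySem.List.pyGetD, pyGet?_list_map, is_empty_column]
  cases PySem.List.pyGet? (pvZip (galaxy.map String.toList)) j <;> rfl

lemma sum_ite_const (Q : Int → Bool) (K : Int) (l : List Int) :
    (l.map (fun i => if Q i then K else 0)).sum = (l.countP Q : Int) * K := by
  induction l with
  | nil => simp
  | cons x t ih =>
      cases h : Q x
      · simp [h, ih]
      · simp [h, ih]; ring

lemma main_eq (galaxy : List String) (star1 : List Int) (star2 : List Int)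
    (hs1 : 2 ≤ star1.length) (hs2 : 2 ≤ star2.length) :
    count_empty_crossings_between_stars galaxy star1 star2
      = count_empty_crossings_between_stars_alt galaxy star1 star2 := by
  unfold count_empty_crossings_between_stars count_empty_crossings_between_stars_alt
  have e10 : PySem.List.pyGet? star1 0 = some (star1.getD 0 0) := by
    have h := PySem.List.pyGet?_ofNat star1 0 (by omega)
    simpa [List.getD, List.getElem?_eq_getElem (show 0 < star1.length by omega)] using h
  have e11 : PySem.List.pyGet? star1 1 = some (star1.getD 1 0) := by
    have h := PySem.List.pyGet?_ofNat star1 1 (by omega)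
    simpa [List.getD, List.getElem?_eq_getElem (show 1 < star1.length by omega)] using h
  have e20 : PySem.List.pyGet? star2 0 = some (star2.getD 0 0) := by
    have h := PySem.List.pyGet?_ofNat star2 0 (by omega)
    simpa [List.getD, List.getElem?_eq_getElem (show 0 < star2.length by omega)] using h
  have e21 : PySem.List.pyGet? star2 1 = some (star2.getD 1 0) := by
    have h := PySem.List.pyGet?_ofNat star2 1 (by omega)
    simpa [List.getD, List.getElem?_eq_getElem (show 1 < star2.length by omega)] using h
  rw [e10, e11, e20, e21]
  simp only [PySem.List.pyGetD_ofNat', lookupRow_eq, lookupCol_eq, PySem.List.foldl_if_add_one]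
  rw [PySem.List.foldl_add]
  have hmap : (PySem.List.pyRange (star1.getD 0 0) (star2.getD 0 0) 1).map
        (fun i => (((PySem.List.pyRange (star1.getD 1 0) (star2.getD 1 0) 1).countP
            (fun j => is_empty_column galaxy j && is_empty_row galaxy i)) : Int))
      = (PySem.List.pyRange (star1.getD 0 0) (star2.getD 0 0) 1).map
        (fun i => if is_empty_row galaxy i
            then (((PySem.List.pyRange (star1.getD 1 0) (star2.getD 1 0) 1).countP
              (is_empty_column galaxy)) : Int) else 0) := by
    apply List.map_congr_left
    intro i _
    cases h : is_empty_row galaxy i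
    · simp
    · simp
  rw [hmap, sum_ite_const]
  simp

-- ===== VERDICT (by name: the statement is the Claim_ definition above) =====
theorem count_empty_crossings_between_stars_spec : Claim_equal_count_empty_crossings_between_stars := by
  intro galaxy star1 star2 _ hpre
  exact main_eq galaxy star1 star2 hpre.1 hpre.2.1
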